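-- pv_equiv track=rewrite | github.com/ryansaenz915/WheelAgent | src/metrics.py | _segment_counts
-- ===== SOURCE A (Python) =====
-- from typing import Any, Dict, List
--
-- def _segment_counts(rows: List[Dict[str, Any]]) -> Dict[str, Dict[str, int]]:
--     segment_counts: Dict[str, Dict[str, int]] = {
--         "severity": {},
--         "case_type": {},
--         "program": {},
--         "used_llm": {},
--         "review_type": {},
--         "clinician_action_taken": {},
--         "duplicate_type": {},
--         "adjudication": {},
--     }
--     for r in rows:
--         values = {
--             "severity": r.get("severity_at_open", "unknown"),
--             "case_type": r.get("case_type", "unknown"),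
--             "program": r.get("program", "unknown"),
--             "used_llm": str(r.get("used_llm", "unknown")),
--             "review_type": r.get("review_type", "unknown"),
--             "clinician_action_taken": r.get("clinician_action_taken", "unknown"),
--             "duplicate_type": r.get("duplicate_type", "unknown"),
--             "adjudication": r.get("clinician_adjudication", "unknown"),
--         }
--         for key, val in values.items():
--             s_val = str(val)
--             segment_counts[key][s_val] = segment_counts[key].get(s_val, 0) + 1
--     return segment_counts
-- ===== SOURCE B (Python) =====
-- from typing import Any, Dict, List
-- from collections import Counter
--
-- _FIELD_MAP = {
--     "severity": "severity_at_open",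
--     "case_type": "case_type",
--     "program": "program",
--     "used_llm": "used_llm",
--     "review_type": "review_type",
--     "clinician_action_taken": "clinician_action_taken",
--     "duplicate_type": "duplicate_type",
--     "adjudication": "clinician_adjudication",
-- }
--
-- def _segment_counts(rows: List[Dict[str, Any]]) -> Dict[str, Dict[str, int]]:
--     # Segment-major: one Counter pass over rows per segment (row order preserved,
--     # so inner insertion order matches; str() applied uniformly as in the original).
--     return {
--         seg: dict(Counter(str(r.get(src, "unknown")) for r in rows))
--         for seg, src in _FIELD_MAP.items()
--     }
-- ===== Notes on version B (the rewrite author's own statement) =====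
-- stated objective: idiomatic
-- what changed: Replaced the row-major loop with an inner per-field update of a mutable dict-of-dicts by a segment-major dict comprehension over a static field map, building each segment's counts with one Counter pass over the rows.
import Mathlib
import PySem

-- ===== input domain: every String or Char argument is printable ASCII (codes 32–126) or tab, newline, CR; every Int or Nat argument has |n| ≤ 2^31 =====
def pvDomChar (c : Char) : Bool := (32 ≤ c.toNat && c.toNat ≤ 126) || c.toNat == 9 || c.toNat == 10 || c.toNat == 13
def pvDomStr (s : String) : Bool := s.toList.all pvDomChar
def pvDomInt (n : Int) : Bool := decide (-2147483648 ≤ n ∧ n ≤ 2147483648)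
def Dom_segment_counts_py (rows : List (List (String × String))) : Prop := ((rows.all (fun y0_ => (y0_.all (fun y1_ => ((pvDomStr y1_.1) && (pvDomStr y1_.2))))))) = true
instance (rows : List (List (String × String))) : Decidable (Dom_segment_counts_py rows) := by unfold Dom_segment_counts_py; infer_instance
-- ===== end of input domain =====

-- B counts segment-major (one Counter pass over rows per segment, from a static field map)
-- instead of A's row-major loop with an inner per-field update; idiomatic, same cost.


-- ===== PORT A =====
-- r.get(key, "unknown") on a row (dict → association list); str() is the identity on these strings
def pvRowGet (r : List (String × String)) (k : String) : String :=
  (PySem.Dict.mk r).getD k "unknown"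

-- the literal `values` dict of A, as its items list (8 distinct literal keys, insertion order)
def pvValues (r : List (String × String)) : List (String × String) :=
  [("severity", pvRowGet r "severity_at_open"),
   ("case_type", pvRowGet r "case_type"),
   ("program", pvRowGet r "program"),
   ("used_llm", pvRowGet r "used_llm"),
   ("review_type", pvRowGet r "review_type"),
   ("clinician_action_taken", pvRowGet r "clinician_action_taken"),
   ("duplicate_type", pvRowGet r "duplicate_type"),
   ("adjudication", pvRowGet r "clinician_adjudication")]

-- the initial segment_counts dict literal
def pvInit : PySem.Dict String (PySem.Dict String Int) :=
  PySem.Dict.mk [("severity", PySem.Dict.empty), ("case_type", PySem.Dict.empty),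
    ("program", PySem.Dict.empty), ("used_llm", PySem.Dict.empty),
    ("review_type", PySem.Dict.empty), ("clinician_action_taken", PySem.Dict.empty),
    ("duplicate_type", PySem.Dict.empty), ("adjudication", PySem.Dict.empty)]

-- segment_counts[key][s_val] = segment_counts[key].get(s_val, 0) + 1
-- (key is always one of the 8 keys present in the dict, so modify's default inner dict is never used)
def pvStep (d : PySem.Dict String (PySem.Dict String Int)) (kv : String × String) :
    PySem.Dict String (PySem.Dict String Int) :=
  d.modify kv.1 PySem.Dict.empty (fun c => c.insert kv.2 (c.getD kv.2 0 + 1))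

def segment_counts_py (rows : List (List (String × String))) : List (String × List (String × Int)) :=
  ((rows.foldl (fun d r => (pvValues r).foldl pvStep d) pvInit).items).map
    (fun p => (p.1, p.2.items))

-- ===== PORT B =====
def pvFieldMap : List (String × String) :=
  [("severity", "severity_at_open"),
   ("case_type", "case_type"),
   ("program", "program"),
   ("used_llm", "used_llm"),
   ("review_type", "review_type"),
   ("clinician_action_taken", "clinician_action_taken"),
   ("duplicate_type", "duplicate_type"),
   ("adjudication", "clinician_adjudication")]

def segment_counts_py_alt (rows : List (List (String × String))) : List (String × List (String × Int)) :=
  pvFieldMap.map (fun sm =>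
    (sm.1, (PySem.Dict.counter (rows.map (fun r => pvRowGet r sm.2))).items))

-- ===== PRECONDITION & SPEC =====
def Spec_segment_counts_py (rows : List (List (String × String))) (out : List (String × List (String × Int))) : Prop := out = segment_counts_py_alt rows
instance (rows : List (List (String × String))) (out : List (String × List (String × Int))) : Decidable (Spec_segment_counts_py rows out) := by unfold Spec_segment_counts_py; infer_instance

-- ===== CLAIM (what is proved, stated in full; the proofs are below) =====
def Claim_equal_segment_counts_py : Prop := ∀ (rows : List (List (String × String))), Dom_segment_counts_py rows → Spec_segment_counts_py rows (segment_counts_py rows)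

-- ===== LEMMAS AND PROOFS =====

-- one inner-dict update, as a standalone step
def pvUpd (c : PySem.Dict String Int) (v : String) : PySem.Dict String Int :=
  c.insert v (c.getD v 0 + 1)

-- A's whole loop, with the 8 counters generalized: the interleaved row-major updates
-- are the 8 independent per-segment folds.
set_option maxHeartbeats 2000000 in
theorem pv_loop_eq (rows : List (List (String × String)))
    (c1 c2 c3 c4 c5 c6 c7 c8 : PySem.Dict String Int) :
    rows.foldl (fun d r => (pvValues r).foldl pvStep d)
      (PySem.Dict.mk [("severity", c1), ("case_type", c2), ("program", c3), ("used_llm", c4),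
        ("review_type", c5), ("clinician_action_taken", c6), ("duplicate_type", c7),
        ("adjudication", c8)]) =
    PySem.Dict.mk
      [("severity", rows.foldl (fun c r => pvUpd c (pvRowGet r "severity_at_open")) c1),
       ("case_type", rows.foldl (fun c r => pvUpd c (pvRowGet r "case_type")) c2),
       ("program", rows.foldl (fun c r => pvUpd c (pvRowGet r "program")) c3),
       ("used_llm", rows.foldl (fun c r => pvUpd c (pvRowGet r "used_llm")) c4),
       ("review_type", rows.foldl (fun c r => pvUpd c (pvRowGet r "review_type")) c5),
       ("clinician_action_taken", rows.foldl (fun c r => pvUpd c (pvRowGet r "clinician_action_taken")) c6),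
       ("duplicate_type", rows.foldl (fun c r => pvUpd c (pvRowGet r "duplicate_type")) c7),
       ("adjudication", rows.foldl (fun c r => pvUpd c (pvRowGet r "clinician_adjudication")) c8)] := by
  induction rows generalizing c1 c2 c3 c4 c5 c6 c7 c8 with
  | nil => rfl
  | cons r rs ih =>
    simp only [List.foldl_cons]
    rw [show (pvValues r).foldl pvStep
        (PySem.Dict.mk [("severity", c1), ("case_type", c2), ("program", c3), ("used_llm", c4),
          ("review_type", c5), ("clinician_action_taken", c6), ("duplicate_type", c7),
          ("adjudication", c8)]) =
      PySem.Dict.mk [("severity", pvUpd c1 (pvRowGet r "severity_at_open")),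
        ("case_type", pvUpd c2 (pvRowGet r "case_type")),
        ("program", pvUpd c3 (pvRowGet r "program")),
        ("used_llm", pvUpd c4 (pvRowGet r "used_llm")),
        ("review_type", pvUpd c5 (pvRowGet r "review_type")),
        ("clinician_action_taken", pvUpd c6 (pvRowGet r "clinician_action_taken")),
        ("duplicate_type", pvUpd c7 (pvRowGet r "duplicate_type")),
        ("adjudication", pvUpd c8 (pvRowGet r "clinician_adjudication"))] from rfl]
    exact ih _ _ _ _ _ _ _ _

-- one segment's fold from empty IS Counter over the gathered column
theorem pv_col_counter (rows : List (List (String × String))) (k : String) :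
    rows.foldl (fun c r => pvUpd c (pvRowGet r k)) PySem.Dict.empty =
    PySem.Dict.counter (rows.map (fun r => pvRowGet r k)) := by
  rw [← PySem.Dict.foldl_insert_getD_add_one_eq_counter, ← List.foldl_map]
  rfl

-- ===== VERDICT (by name: the statement is the Claim_ definition above) =====
theorem segment_counts_py_spec : Claim_equal_segment_counts_py := by
  intro rows _
  show segment_counts_py rows = segment_counts_py_alt rows
  unfold segment_counts_py pvInit
  rw [pv_loop_eq, pv_col_counter, pv_col_counter, pv_col_counter, pv_col_counter,
    pv_col_counter, pv_col_counter, pv_col_counter, pv_col_counter]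
  rfl
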